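-- pv_equiv track=rewrite | github.com/Blu-ze/Chamourai | Algo.py | supprimer
-- ===== SOURCE A (Python) =====
-- def supprimer(l, k):
--     if k < 1 or k > len(l):
--         raise ValueError("Error")
--     else:
--         long = len(l)
--         while k-1 < long-1:
--             l[k-1] = l[k]
--             k += 1
--         l.pop()
--         return l
-- ===== SOURCE B (Python) =====
-- def supprimer(l, k):
--     if k < 1 or k > len(l):
--         raise ValueError("Error")
--     l[:] = l[:k-1] + l[k:]
--     return l
-- ===== Notes on version B (the rewrite author's own statement) =====
-- stated objective: simpler
-- what changed: Replaces the element-by-element left-shift loop followed by pop() with a single in-place slice assignment l[:] = l[:k-1] + l[k:].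
import Mathlib
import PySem

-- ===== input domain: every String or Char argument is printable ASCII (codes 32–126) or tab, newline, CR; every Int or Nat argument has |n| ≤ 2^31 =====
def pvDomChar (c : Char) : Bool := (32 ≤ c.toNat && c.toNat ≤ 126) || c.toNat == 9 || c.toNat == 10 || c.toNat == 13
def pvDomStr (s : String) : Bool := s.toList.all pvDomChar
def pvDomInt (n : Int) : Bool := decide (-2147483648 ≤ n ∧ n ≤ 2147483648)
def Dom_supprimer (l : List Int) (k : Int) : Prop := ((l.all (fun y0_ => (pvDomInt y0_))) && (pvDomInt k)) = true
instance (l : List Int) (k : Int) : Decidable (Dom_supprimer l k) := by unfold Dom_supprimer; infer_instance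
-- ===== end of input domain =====

-- B replaces A's element-by-element left-shift loop + pop() with one slice concatenation (simpler);
-- both mutate the list in place in Python, the equivalence proved here is about the return value.


-- ===== PORT A =====
-- the while-loop: while k-1 < long-1: l[k-1] = l[k]; k += 1
def supprimerLoop (l : List Int) (k : Int) (long : Int) : List Int :=
  if _h : k - 1 < long - 1 then
    supprimerLoop (PySem.List.pySetD l (k - 1) (PySem.List.pyGetD l k 0)) (k + 1) long
  else l
termination_by (long - k).toNat
decreasing_by omega

def supprimer (l : List Int) (k : Int) : List Int :=
  if k < 1 ∨ k > PySem.List.len l then []   -- raise ValueError("Error"): excluded by Pre_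
  else
    let long := PySem.List.len l
    let l' := supprimerLoop l k long
    match PySem.List.pop? l' (-1) with       -- l.pop()
    | some (_, rest) => rest
    | none => []                             -- unreachable under Pre_

-- ===== PORT B =====
def supprimer_alt (l : List Int) (k : Int) : List Int :=
  if k < 1 ∨ k > PySem.List.len l then []   -- raise ValueError("Error"): excluded by Pre_
  else PySem.List.slice l none (some (k - 1)) ++ PySem.List.slice l (some k) none

-- ===== PRECONDITION & SPEC =====
-- Pre_ excludes exactly the inputs where A raises ValueError (k < 1 or k > len(l))
def Pre_supprimer (l : List Int) (k : Int) : Prop := 1 ≤ k ∧ k ≤ l.length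
instance (l : List Int) (k : Int) : Decidable (Pre_supprimer l k) := by unfold Pre_supprimer; infer_instance
def pvWitness_supprimer : List Int × Int := ([3, 1, 4, 1, 5], 2)

def Spec_supprimer (l : List Int) (k : Int) (out : List Int) : Prop := out = supprimer_alt l k
instance (l : List Int) (k : Int) (out : List Int) : Decidable (Spec_supprimer l k out) := by unfold Spec_supprimer; infer_instance

-- ===== CLAIM (what is proved, stated in full; the proofs are below) =====
def Claim_equal_supprimer : Prop := ∀ (l : List Int) (k : Int), Dom_supprimer l k → Pre_supprimer l k → Spec_supprimer l k (supprimer l k)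

-- ===== LEMMAS AND PROOFS =====

-- the shift loop turns l into  l[:k-1] ++ l[k:] ++ [l[-1]]  (last element duplicated at the end)
theorem supprimerLoop_eq (fuel : Nat) :
    ∀ (l : List Int) (k : Int), 1 ≤ k → k ≤ l.length → fuel = ((l.length : Int) - k).toNat →
      supprimerLoop l k (l.length : Int) =
        (l.take (k - 1).toNat ++ l.drop k.toNat) ++ l.drop (l.length - 1) := by
  induction fuel with
  | zero =>
    intro l k h1 h2 hf
    have hk : k = (l.length : Int) := by omega
    rw [supprimerLoop]
    rw [dif_neg (by omega : ¬ k - 1 < (l.length : Int) - 1)]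
    have h3 : (k - 1).toNat = l.length - 1 := by omega
    have h4 : k.toNat = l.length := by omega
    rw [h3, h4]
    simp [List.take_append_drop]
  | succ n ih =>
    intro l k h1 h2 hf
    by_cases hlt : k - 1 < (l.length : Int) - 1
    · rw [supprimerLoop]
      rw [dif_pos hlt]
      have hkn : k.toNat < l.length := by omega
      rw [PySem.List.pyGetD_eq_getElem l 0 (by omega) (by omega),
          PySem.List.pySetD_of_nonneg l _ (by omega)]
      -- recurse on l' = l.set (k-1) l[k]
      have hlen : (l.set (k - 1).toNat (l[k.toNat]'hkn)).length = l.length := by simp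
      have hrec := ih (l.set (k - 1).toNat (l[k.toNat]'hkn)) (k + 1)
        (by omega) (by rw [hlen]; omega) (by rw [hlen]; omega)
      rw [hlen] at hrec
      rw [hrec]
      have hidx : (k - 1).toNat < l.length := by omega
      have hsplit : l.set (k - 1).toNat (l[k.toNat]'hkn) =
          l.take (k - 1).toNat ++ (l[k.toNat]'hkn) :: l.drop ((k - 1).toNat + 1) :=
        List.set_eq_take_cons_drop _ hidx
      have htake : (l.set (k - 1).toNat (l[k.toNat]'hkn)).take (k + 1 - 1).toNat =
          l.take (k - 1).toNat ++ [l[k.toNat]'hkn] := by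
        rw [hsplit, List.take_append]
        have hlt' : (l.take (k - 1).toNat).length = (k - 1).toNat := by
          simp [List.length_take]; omega
        have h5 : (k + 1 - 1).toNat - (l.take (k - 1).toNat).length = 1 := by rw [hlt']; omega
        rw [h5, List.take_take]
        simp
      have hdrop : (l.set (k - 1).toNat (l[k.toNat]'hkn)).drop (k + 1).toNat =
          l.drop (k + 1).toNat :=
        List.drop_set_of_lt (by omega : (k - 1).toNat < (k + 1).toNat)
      have hlast : (l.set (k - 1).toNat (l[k.toNat]'hkn)).drop (l.length - 1) =
          l.drop (l.length - 1) :=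
        List.drop_set_of_lt (by omega : (k - 1).toNat < l.length - 1)
      rw [htake, hdrop, hlast]
      have hdropk : l.drop k.toNat = (l[k.toNat]'hkn) :: l.drop (k + 1).toNat := by
        have h7 : (k + 1).toNat = k.toNat + 1 := by omega
        rw [h7, List.drop_eq_getElem_cons hkn]
      rw [hdropk]
      simp
    · rw [supprimerLoop]
      rw [dif_neg hlt]
      have hk : k = (l.length : Int) := by omega
      have h3 : (k - 1).toNat = l.length - 1 := by omega
      have h4 : k.toNat = l.length := by omega
      rw [h3, h4]
      simp [List.take_append_drop]

-- ===== VERDICT (by name: the statement is the Claim_ definition above) =====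
theorem supprimer_spec : Claim_equal_supprimer := by
  intro l k _hdom hpre
  obtain ⟨h1, h2⟩ := hpre
  unfold Spec_supprimer supprimer supprimer_alt
  have hne : ¬ (k < 1 ∨ k > PySem.List.len l) := by
    simp only [PySem.List.len_eq]; omega
  rw [if_neg hne, if_neg hne]
  simp only [PySem.List.len_eq]
  have hlp := supprimerLoop_eq ((l.length : Int) - k).toNat l k h1 h2 rfl
  rw [hlp]
  have hlen0 : 0 < l.length := by omega
  have hlastd : l.drop (l.length - 1) = [l[l.length - 1]'(by omega)] := by
    rw [List.drop_eq_getElem_cons (by omega : l.length - 1 < l.length)]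
    have : l.length - 1 + 1 = l.length := by omega
    rw [this, List.drop_length]
  rw [hlastd, PySem.List.pop?_last]
  have hslice1 : PySem.List.slice l none (some (k - 1)) = l.take (k - 1).toNat :=
    PySem.List.slice_to l (by omega)
  have hslice2 : PySem.List.slice l (some k) none = l.drop k.toNat :=
    PySem.List.slice_from l (by omega)
  rw [hslice1, hslice2]
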